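-- pv_equiv track=rewrite | github.com/JerryFox/chess | chess_exercise01.py | unpacked_to_packed_position
-- ===== SOURCE A (Python) =====
-- FIGURES = "RNBKQBNRPrnbkqbnrp"
--
-- def unpacked_to_packed_position(position):
--     packed_position = ""
--     number_of_blanks = 0
--     for character in position:
--         if character not in FIGURES:
--             number_of_blanks += 1
--         else:
--             # write number of blanks or single blank before figure
--             if number_of_blanks:
--                 packed_position += "-" if number_of_blanks == 1 else str(number_of_blanks)
--                 number_of_blanks = 0   # blanks are written
--             # write figure
--             packed_position += character
--     # possible rest in number_of_blanks is ignored
--     return packed_position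
-- ===== SOURCE B (Python) =====
-- FIGURES = "RNBKQBNRPrnbkqbnrp"
--
-- def unpacked_to_packed_position(position):
--     # Split the position into maximal runs of figures / non-figures, then
--     # render each run (figure run verbatim; blank run as '-' or its length),
--     # dropping a blank run that ends the string.
--     groups = []
--     for c in position:
--         k = c in FIGURES
--         if groups and groups[-1][0] == k:
--             groups[-1][1].append(c)
--         else:
--             groups.append((k, [c]))
--     parts = []
--     for i, (k, run) in enumerate(groups):
--         if k:
--             parts.append(''.join(run))
--         elif i != len(groups) - 1:
--             parts.append('-' if len(run) == 1 else str(len(run)))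
--     return ''.join(parts)
-- ===== Notes on version B (the rewrite author's own statement) =====
-- stated objective: alternative
-- what changed: Replaces A's single character-by-character scan with a running blank counter by a two-phase run decomposition: split the string into maximal figure/blank runs (appending to the last group), then render each run (figure runs verbatim, blank runs as '-' or their length), skipping a blank run that is the final group.
import Mathlib
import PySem

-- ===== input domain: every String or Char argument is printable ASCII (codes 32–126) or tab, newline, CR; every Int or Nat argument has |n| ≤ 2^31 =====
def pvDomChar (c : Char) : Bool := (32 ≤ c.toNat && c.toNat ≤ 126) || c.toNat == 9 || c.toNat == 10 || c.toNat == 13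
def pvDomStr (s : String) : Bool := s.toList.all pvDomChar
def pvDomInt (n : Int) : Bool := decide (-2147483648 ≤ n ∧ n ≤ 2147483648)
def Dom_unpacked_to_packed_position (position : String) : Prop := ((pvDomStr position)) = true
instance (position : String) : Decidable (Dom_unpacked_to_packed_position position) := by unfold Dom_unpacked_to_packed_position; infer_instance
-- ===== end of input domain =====

-- B replaces A's per-character blank counter by a run-splitting pass (group the string
-- into maximal figure/blank runs, then render each run, dropping a trailing blank run);
-- objective: alternative decomposition, same cost.


-- ===== PORT A =====
-- FIGURES = "RNBKQBNRPrnbkqbnrp"; 'character in FIGURES' for a single character is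
-- exactly list membership of that character (exact port of the substring test).
def pvFigures : List Char := "RNBKQBNRPrnbkqbnrp".toList

-- "-" if n == 1 else str(n)
def pvBlankChars (nb : Int) : List Char :=
  if nb = 1 then ['-'] else PySem.Int.toChars nb

def unpacked_to_packed_position (position : String) : String :=
  String.ofList ((position.toList.foldl
    (fun (st : List Char × Int) character =>
      if ¬ (pvFigures.contains character) then (st.1, st.2 + 1)
      else ((if st.2 ≠ 0 then st.1 ++ pvBlankChars st.2 else st.1) ++ [character], 0))
    ([], 0)).1)

-- ===== PORT B =====
-- Source B's run-splitting loop (append c to the last group if same kind, else start a new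
-- group), expressed as structural recursion producing the same group list.
def pvGroups : List Char → List (Bool × List Char)
  | [] => []
  | c :: rest =>
    match pvGroups rest with
    | (k, run) :: gs =>
      if pvFigures.contains c = k then (k, c :: run) :: gs
      else (pvFigures.contains c, [c]) :: (k, run) :: gs
    | [] => [(pvFigures.contains c, [c])]

-- Source B's rendering loop over the groups: figure run verbatim; blank run as '-'/length,
-- skipped when it is the last group.
def pvRender : List (Bool × List Char) → List Char
  | [] => []
  | (true, run) :: gs => run ++ pvRender gs
  | [(false, _)] => []
  | (false, run) :: gs => pvBlankChars (run.length : Int) ++ pvRender gs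

def unpacked_to_packed_position_alt (position : String) : String :=
  String.ofList (pvRender (pvGroups position.toList))

-- ===== PRECONDITION & SPEC =====
def Spec_unpacked_to_packed_position (position : String) (out : String) : Prop := out = unpacked_to_packed_position_alt position
instance (position : String) (out : String) : Decidable (Spec_unpacked_to_packed_position position out) := by unfold Spec_unpacked_to_packed_position; infer_instance

-- ===== CLAIM (what is proved, stated in full; the proofs are below) =====
def Claim_equal_unpacked_to_packed_position : Prop := ∀ (position : String), Dom_unpacked_to_packed_position position → Spec_unpacked_to_packed_position position (unpacked_to_packed_position position)

-- ===== LEMMAS AND PROOFS =====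

-- what A's loop emits for the rest of the string, given nb pending blanks
def pvEmit : Int → List Char → List Char
  | _, [] => []
  | nb, c :: rest =>
    if pvFigures.contains c then
      ((if nb ≠ 0 then pvBlankChars nb else []) ++ [c]) ++ pvEmit 0 rest
    else pvEmit (nb + 1) rest

-- rendering of a group list with nb extra pending blanks in front
def pvRenderPre : Int → List (Bool × List Char) → List Char
  | _, [] => []
  | nb, (true, run) :: gs => (if nb ≠ 0 then pvBlankChars nb else []) ++ run ++ pvRenderPre 0 gs
  | nb, (false, run) :: gs => pvRenderPre (nb + run.length) gs

theorem pvFoldA (l : List Char) : ∀ (acc : List Char) (nb : Int),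
    (l.foldl (fun (st : List Char × Int) character =>
      if ¬ (pvFigures.contains character) then (st.1, st.2 + 1)
      else ((if st.2 ≠ 0 then st.1 ++ pvBlankChars st.2 else st.1) ++ [character], 0))
      (acc, nb)).1 = acc ++ pvEmit nb l := by
  induction l with
  | nil => intro acc nb; simp [pvEmit]
  | cons c rest ih =>
    intro acc nb
    rw [List.foldl_cons]
    by_cases h : c ∈ pvFigures
    · rw [if_neg (by simp [h])]
      by_cases hnb : nb = 0
      · rw [if_neg (by simp [hnb]), ih]
        simp [pvEmit, h, hnb, List.append_assoc]
      · rw [if_pos (by simp [hnb]), ih]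
        simp [pvEmit, h, hnb, List.append_assoc]
    · rw [if_pos (by simp [h]), ih]
      simp [pvEmit, h]

theorem pvEmit_eq (l : List Char) : ∀ (nb : Int),
    pvEmit nb l = pvRenderPre nb (pvGroups l) := by
  induction l with
  | nil => intro nb; simp [pvEmit, pvGroups, pvRenderPre]
  | cons c rest ih =>
    intro nb
    by_cases h : c ∈ pvFigures
    · -- figure character
      cases hg : pvGroups rest with
      | nil => simp [pvEmit, h, pvGroups, hg, pvRenderPre, ih]
      | cons g gs =>
        obtain ⟨k, run⟩ := g
        cases k with
        | true =>
          simp [pvEmit, h, pvGroups, hg, pvRenderPre, ih, List.append_assoc]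
        | false =>
          simp [pvEmit, h, pvGroups, hg, pvRenderPre, ih, List.append_assoc]
    · -- blank character
      cases hg : pvGroups rest with
      | nil => simp [pvEmit, h, pvGroups, hg, pvRenderPre, ih]
      | cons g gs =>
        obtain ⟨k, run⟩ := g
        cases k with
        | true => simp [pvEmit, h, pvGroups, hg, pvRenderPre, ih]
        | false =>
          have hnb : (nb + 1) + (run.length : Int) = nb + ((run.length : Int) + 1) := by omega
          simp [pvEmit, h, pvGroups, hg, pvRenderPre, ih, hnb]

-- the groups produced by pvGroups: nonempty runs, alternating kinds
def pvOk : List (Bool × List Char) → Prop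
  | [] => True
  | [(_, run)] => run ≠ []
  | (k1, r1) :: (k2, r2) :: gs => r1 ≠ [] ∧ k1 ≠ k2 ∧ pvOk ((k2, r2) :: gs)

theorem pvGroups_ok (l : List Char) : pvOk (pvGroups l) := by
  induction l with
  | nil => simp [pvGroups, pvOk]
  | cons c rest ih =>
    cases hg : pvGroups rest with
    | nil => simp [pvGroups, hg, pvOk]
    | cons g gs =>
      obtain ⟨k, run⟩ := g
      rw [hg] at ih
      by_cases h : decide (c ∈ pvFigures) = k
      · cases gs with
        | nil => simp [pvGroups, hg, h, pvOk]
        | cons g2 gs2 =>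
          obtain ⟨k2, r2⟩ := g2
          simp [pvGroups, hg, h, pvOk] at ih ⊢
          exact ⟨ih.2.1, ih.2.2⟩
      · cases gs with
        | nil =>
          simp [pvGroups, hg, h, pvOk] at ih ⊢
          exact ih
        | cons g2 gs2 =>
          obtain ⟨k2, r2⟩ := g2
          simp [pvGroups, hg, h, pvOk] at ih ⊢
          exact ih

theorem pvRender_eq : ∀ (gs : List (Bool × List Char)), pvOk gs →
    pvRender gs = pvRenderPre 0 gs := by
  intro gs
  induction gs with
  | nil => intro _; simp [pvRender, pvRenderPre]
  | cons g gs ih =>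
    intro hok
    obtain ⟨k, run⟩ := g
    cases k with
    | true =>
      have hok' : pvOk gs := by
        cases gs with
        | nil => trivial
        | cons g2 gs2 => exact hok.2.2
      simp [pvRender, pvRenderPre, ih hok']
    | false =>
      cases gs with
      | nil => simp [pvRender, pvRenderPre]
      | cons g2 gs2 =>
        obtain ⟨k2, r2⟩ := g2
        have hrun : run ≠ [] := hok.1
        have hk2 : k2 = true := by
          cases k2 with
          | true => rfl
          | false => exact absurd rfl hok.2.1
        subst hk2
        have ih2 : pvRender gs2 = pvRenderPre 0 gs2 := by
          simpa [pvRender, pvRenderPre] using ih hok.2.2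
        simp [pvRender, pvRenderPre, hrun, ih2, List.append_assoc]

-- ===== VERDICT (by name: the statement is the Claim_ definition above) =====
theorem unpacked_to_packed_position_spec : Claim_equal_unpacked_to_packed_position := by
  intro position _
  unfold Spec_unpacked_to_packed_position unpacked_to_packed_position unpacked_to_packed_position_alt
  rw [pvFoldA, pvEmit_eq, pvRender_eq _ (pvGroups_ok _)]
  simp
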